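-- pv_equiv track=rewrite | github.com/m-ahsan-nazer/aoc2021 | day20.py | map_coords_value_to_pixel
-- ===== SOURCE A (Python) =====
-- from typing import List, Dict, Tuple, NewType
--
-- def map_coords_value_to_pixel(
--     output_pixel_coord: Tuple[int, int], iea: str, input_image: Dict, dim: int
-- ) -> str:
--     input_pixels = ""
--     x, y = output_pixel_coord
--     for j in [y - 1, y, y + 1]:
--         for i in [x - 1, x, x + 1]:
--             pixel_value = input_image.get((i, j), ".")
--             input_pixels += pixel_value
--
--     input_pixels = input_pixels.replace("#", "1")
--     input_pixels = input_pixels.replace(".", "0")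
--     input_pixels_decimal_value = int(input_pixels, 2)
--     return iea[input_pixels_decimal_value]
-- ===== SOURCE B (Python) =====
-- WEIGHTED_OFFSETS = [
--     (256, (-1, -1)), (128, (0, -1)), (64, (1, -1)),
--     (32, (-1, 0)), (16, (0, 0)), (8, (1, 0)),
--     (4, (-1, 1)), (2, (0, 1)), (1, (1, 1)),
-- ]
--
-- def map_coords_value_to_pixel(output_pixel_coord, iea, input_image, dim):
--     x, y = output_pixel_coord
--     idx = sum(w if input_image.get((x + dx, y + dy), ".") == "#" else 0
--               for w, (dx, dy) in WEIGHTED_OFFSETS)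
--     return iea[idx]
-- ===== Notes on version B (the rewrite author's own statement) =====
-- stated objective: simpler
-- what changed: Instead of concatenating a 9-character string, doing two str.replace passes and parsing it with int(.,2), B sums precomputed powers of two from a weighted offset table for the neighbours that are '#', then indexes the lookup string directly.
-- outside the precondition, e.g. on map_coords_value_to_pixel((0, 0), '0123456789abcdef#', {(0, 0): '1'}, 0): A returns '#', B returns '0'
import Mathlib
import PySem

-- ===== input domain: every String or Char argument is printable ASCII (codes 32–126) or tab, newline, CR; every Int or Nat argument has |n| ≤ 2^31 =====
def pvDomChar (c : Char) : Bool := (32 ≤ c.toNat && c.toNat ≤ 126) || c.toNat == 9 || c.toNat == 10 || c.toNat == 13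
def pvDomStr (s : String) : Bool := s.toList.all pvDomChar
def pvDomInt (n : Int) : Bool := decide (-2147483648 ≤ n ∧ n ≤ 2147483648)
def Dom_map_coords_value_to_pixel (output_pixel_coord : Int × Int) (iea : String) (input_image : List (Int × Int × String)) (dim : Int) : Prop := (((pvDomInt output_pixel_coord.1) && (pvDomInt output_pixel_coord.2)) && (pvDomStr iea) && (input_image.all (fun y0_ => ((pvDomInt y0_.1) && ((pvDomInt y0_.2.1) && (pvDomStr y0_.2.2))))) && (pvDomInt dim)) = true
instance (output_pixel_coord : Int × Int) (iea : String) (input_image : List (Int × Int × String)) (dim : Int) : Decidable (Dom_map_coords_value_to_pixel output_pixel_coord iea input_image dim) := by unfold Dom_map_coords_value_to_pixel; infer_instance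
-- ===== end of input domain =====

-- B replaces A's build-a-9-char-string / replace / int(.,2) pipeline by summing powers of two
-- from a weighted offset table (objective: simpler).


-- shared helper: Python's `input_image.get((i, j), ".")`; the dict is the association list read
-- with Python's dict(...) semantics (later duplicate keys overwrite earlier ones)
def pvImgGet (input_image : List (Int × Int × String)) (i j : Int) : String :=
  (PySem.Dict.ofList (input_image.map (fun e => ((e.1, e.2.1), e.2.2)))).getD (i, j) "."

-- ===== PORT A =====
-- builds the 9-char string over List Char (PySem convention), replaces '#'→'1' and '.'→'0',
-- parses with int(·, 2) = PySem.Int.ofCharsBase?; "" stands for the excluded ValueError/IndexError cases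
def map_coords_value_to_pixel (output_pixel_coord : Int × Int) (iea : String) (input_image : List (Int × Int × String)) (dim : Int) : String :=
  let x := output_pixel_coord.1
  let y := output_pixel_coord.2
  let input_pixels : List Char :=
    [y - 1, y, y + 1].foldl (fun s j =>
      [x - 1, x, x + 1].foldl (fun s i => s ++ (pvImgGet input_image i j).toList) s) []
  let input_pixels := PySem.Chars.replace input_pixels ['#'] ['1']
  let input_pixels := PySem.Chars.replace input_pixels ['.'] ['0']
  match PySem.Int.ofCharsBase? input_pixels 2 with
  | none => ""          -- int(s, 2) raises ValueError: excluded by Pre_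
  | some n =>
    match PySem.Str.pyGet? iea n with
    | some c => String.mk [c]   -- Python's 1-char string iea[n]
    | none => ""                -- IndexError: excluded by Pre_

-- ===== PORT B =====
def pvWeights : List (Int × Int × Int) :=
  [(256, -1, -1), (128, 0, -1), (64, 1, -1),
   (32, -1, 0), (16, 0, 0), (8, 1, 0),
   (4, -1, 1), (2, 0, 1), (1, 1, 1)]

-- the sum comprehension is the foldl adding w's indicator term for each weighted offset
def map_coords_value_to_pixel_alt (output_pixel_coord : Int × Int) (iea : String) (input_image : List (Int × Int × String)) (dim : Int) : String :=
  let x := output_pixel_coord.1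
  let y := output_pixel_coord.2
  let idx : Int := pvWeights.foldl
    (fun acc w => acc + (if pvImgGet input_image (x + w.2.1) (y + w.2.2) = "#" then w.1 else 0)) 0
  match PySem.Str.pyGet? iea idx with
  | some c => String.mk [c]
  | none => ""                  -- IndexError: excluded by Pre_

-- ===== PRECONDITION & SPEC =====
-- the 3x3-neighbourhood index of A, written out (used only to state the IndexError bound)
def pvNbrIdx (output_pixel_coord : Int × Int) (input_image : List (Int × Int × String)) : Int :=
  (if pvImgGet input_image (output_pixel_coord.1 - 1) (output_pixel_coord.2 - 1) = "#" then 256 else 0) +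
  (if pvImgGet input_image (output_pixel_coord.1) (output_pixel_coord.2 - 1) = "#" then 128 else 0) +
  (if pvImgGet input_image (output_pixel_coord.1 + 1) (output_pixel_coord.2 - 1) = "#" then 64 else 0) +
  (if pvImgGet input_image (output_pixel_coord.1 - 1) (output_pixel_coord.2) = "#" then 32 else 0) +
  (if pvImgGet input_image (output_pixel_coord.1) (output_pixel_coord.2) = "#" then 16 else 0) +
  (if pvImgGet input_image (output_pixel_coord.1 + 1) (output_pixel_coord.2) = "#" then 8 else 0) +
  (if pvImgGet input_image (output_pixel_coord.1 - 1) (output_pixel_coord.2 + 1) = "#" then 4 else 0) +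
  (if pvImgGet input_image (output_pixel_coord.1) (output_pixel_coord.2 + 1) = "#" then 2 else 0) +
  (if pvImgGet input_image (output_pixel_coord.1 + 1) (output_pixel_coord.2 + 1) = "#" then 1 else 0)

-- Pre_ excludes (a) neighbourhoods containing a pixel value other than "#"/"." — there A either
-- raises ValueError from int(·, 2) or accidentally parses digit strings like "1" as image data —
-- and (b) indices out of range of iea, where A raises IndexError.
def Pre_map_coords_value_to_pixel (output_pixel_coord : Int × Int) (iea : String) (input_image : List (Int × Int × String)) (dim : Int) : Prop :=
  (∀ dx ∈ [(-1 : Int), 0, 1], ∀ dy ∈ [(-1 : Int), 0, 1],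
      pvImgGet input_image (output_pixel_coord.1 + dx) (output_pixel_coord.2 + dy) = "#" ∨
      pvImgGet input_image (output_pixel_coord.1 + dx) (output_pixel_coord.2 + dy) = ".") ∧
  pvNbrIdx output_pixel_coord input_image < (iea.toList.length : Int)

instance (output_pixel_coord : Int × Int) (iea : String) (input_image : List (Int × Int × String)) (dim : Int) : Decidable (Pre_map_coords_value_to_pixel output_pixel_coord iea input_image dim) := by unfold Pre_map_coords_value_to_pixel; infer_instance

def pvWitness_map_coords_value_to_pixel : (Int × Int) × String × (List (Int × Int × String)) × Int :=
  ((0, 0), "a", [], 0)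

def Spec_map_coords_value_to_pixel (output_pixel_coord : Int × Int) (iea : String) (input_image : List (Int × Int × String)) (dim : Int) (out : String) : Prop := out = map_coords_value_to_pixel_alt output_pixel_coord iea input_image dim
instance (output_pixel_coord : Int × Int) (iea : String) (input_image : List (Int × Int × String)) (dim : Int) (out : String) : Decidable (Spec_map_coords_value_to_pixel output_pixel_coord iea input_image dim out) := by unfold Spec_map_coords_value_to_pixel; infer_instance

-- ===== CLAIM (what is proved, stated in full; the proofs are below) =====
def Claim_equal_map_coords_value_to_pixel : Prop := ∀ (output_pixel_coord : Int × Int) (iea : String) (input_image : List (Int × Int × String)) (dim : Int), Dom_map_coords_value_to_pixel output_pixel_coord iea input_image dim → Pre_map_coords_value_to_pixel output_pixel_coord iea input_image dim → Spec_map_coords_value_to_pixel output_pixel_coord iea input_image dim (map_coords_value_to_pixel output_pixel_coord iea input_image dim)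

-- ===== LEMMAS AND PROOFS =====

-- ===== VERDICT (by name: the statement is the Claim_ definition above) =====

def pvStrOf (b : Bool) : String := if b then "#" else "."

-- the string-pipeline index (A) equals the weighted indicator sum (B), for all 9 neighbour bits
set_option maxHeartbeats 4000000 in
theorem pvParse (b1 b2 b3 b4 b5 b6 b7 b8 b9 : Bool) :
    PySem.Int.ofCharsBase? (PySem.Chars.replace (PySem.Chars.replace ([] ++ (pvStrOf b1).toList ++ (pvStrOf b2).toList ++ (pvStrOf b3).toList ++ (pvStrOf b4).toList ++ (pvStrOf b5).toList ++ (pvStrOf b6).toList ++ (pvStrOf b7).toList ++ (pvStrOf b8).toList ++ (pvStrOf b9).toList) ['#'] ['1']) ['.'] ['0']) 2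
    = some (0 + (if pvStrOf b1 = "#" then 256 else 0) + (if pvStrOf b2 = "#" then 128 else 0) + (if pvStrOf b3 = "#" then 64 else 0) + (if pvStrOf b4 = "#" then 32 else 0) + (if pvStrOf b5 = "#" then 16 else 0) + (if pvStrOf b6 = "#" then 8 else 0) + (if pvStrOf b7 = "#" then 4 else 0) + (if pvStrOf b8 = "#" then 2 else 0) + (if pvStrOf b9 = "#" then 1 else 0) : Int) := by
  revert b1 b2 b3 b4 b5 b6 b7 b8 b9; decide

-- ===== VERDICT (by name: the statement is the Claim_ definition above) =====
theorem map_coords_value_to_pixel_spec : Claim_equal_map_coords_value_to_pixel := by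
  intro ⟨x, y⟩ iea input_image dim _ hpre
  obtain ⟨hv, _⟩ := hpre
  have h1 := hv (-1) (by simp) (-1) (by simp)
  have h2 := hv 0 (by simp) (-1) (by simp)
  have h3 := hv 1 (by simp) (-1) (by simp)
  have h4 := hv (-1) (by simp) 0 (by simp)
  have h5 := hv 0 (by simp) 0 (by simp)
  have h6 := hv 1 (by simp) 0 (by simp)
  have h7 := hv (-1) (by simp) 1 (by simp)
  have h8 := hv 0 (by simp) 1 (by simp)
  have h9 := hv 1 (by simp) 1 (by simp)
  simp only [add_zero] at h1 h2 h3 h4 h5 h6 h7 h8 h9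
  obtain ⟨b1, e1⟩ : ∃ b, pvImgGet input_image (x + -1) (y + -1) = pvStrOf b := by
    rcases h1 with h | h; exacts [⟨true, h⟩, ⟨false, h⟩]
  obtain ⟨b2, e2⟩ : ∃ b, pvImgGet input_image x (y + -1) = pvStrOf b := by
    rcases h2 with h | h; exacts [⟨true, h⟩, ⟨false, h⟩]
  obtain ⟨b3, e3⟩ : ∃ b, pvImgGet input_image (x + 1) (y + -1) = pvStrOf b := by
    rcases h3 with h | h; exacts [⟨true, h⟩, ⟨false, h⟩]
  obtain ⟨b4, e4⟩ : ∃ b, pvImgGet input_image (x + -1) y = pvStrOf b := by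
    rcases h4 with h | h; exacts [⟨true, h⟩, ⟨false, h⟩]
  obtain ⟨b5, e5⟩ : ∃ b, pvImgGet input_image x y = pvStrOf b := by
    rcases h5 with h | h; exacts [⟨true, h⟩, ⟨false, h⟩]
  obtain ⟨b6, e6⟩ : ∃ b, pvImgGet input_image (x + 1) y = pvStrOf b := by
    rcases h6 with h | h; exacts [⟨true, h⟩, ⟨false, h⟩]
  obtain ⟨b7, e7⟩ : ∃ b, pvImgGet input_image (x + -1) (y + 1) = pvStrOf b := by
    rcases h7 with h | h; exacts [⟨true, h⟩, ⟨false, h⟩]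
  obtain ⟨b8, e8⟩ : ∃ b, pvImgGet input_image x (y + 1) = pvStrOf b := by
    rcases h8 with h | h; exacts [⟨true, h⟩, ⟨false, h⟩]
  obtain ⟨b9, e9⟩ : ∃ b, pvImgGet input_image (x + 1) (y + 1) = pvStrOf b := by
    rcases h9 with h | h; exacts [⟨true, h⟩, ⟨false, h⟩]
  unfold Spec_map_coords_value_to_pixel map_coords_value_to_pixel map_coords_value_to_pixel_alt pvWeights
  simp only [List.foldl, add_zero]
  rw [show x - 1 = x + -1 from by ring, show y - 1 = y + -1 from by ring]
  rw [e1, e2, e3, e4, e5, e6, e7, e8, e9]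
  rw [pvParse b1 b2 b3 b4 b5 b6 b7 b8 b9]
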